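-- pv_equiv track=rewrite | github.com/easycodinggithub/Programmers_Python | 코드 처리하기.py | solution
-- ===== SOURCE A (Python) =====
-- def solution(code):
--     mode = 0
--     ret = []
--     for i in range(0, len(code), 1):
--         if (mode == 0):
--             if (code[i] == "1"):
--                 mode = 1
--             else:
--                 if (i % 2 == 0):
--                     ret.append(code[i])
--         else:
--             if (code[i] == "1"):
--                 mode = 0
--             else:
--                 if (i % 2 == 1):
--                     ret.append(code[i])
--     if (len(ret) == 0):
--         return "EMPTY"
--     return "".join(ret)
-- ===== SOURCE B (Python) =====
-- def solution(code):
--     ret = []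
--     pos = 0
--     for j, seg in enumerate(code.split('1')):
--         mode = j & 1
--         for off, ch in enumerate(seg):
--             if (pos + off) % 2 == mode:
--                 ret.append(ch)
--         pos += len(seg) + 1
--     return "EMPTY" if not ret else "".join(ret)
-- ===== Notes on version B (the rewrite author's own statement) =====
-- stated objective: alternative
-- what changed: Replaces A's single stateful character walk (mode flag toggled in-loop, branch per character) with a split-on-delimiter decomposition: split the code on the toggle character, mode = segment index parity, characters filtered by absolute-index parity with a running position counter.
import Mathlib
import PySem

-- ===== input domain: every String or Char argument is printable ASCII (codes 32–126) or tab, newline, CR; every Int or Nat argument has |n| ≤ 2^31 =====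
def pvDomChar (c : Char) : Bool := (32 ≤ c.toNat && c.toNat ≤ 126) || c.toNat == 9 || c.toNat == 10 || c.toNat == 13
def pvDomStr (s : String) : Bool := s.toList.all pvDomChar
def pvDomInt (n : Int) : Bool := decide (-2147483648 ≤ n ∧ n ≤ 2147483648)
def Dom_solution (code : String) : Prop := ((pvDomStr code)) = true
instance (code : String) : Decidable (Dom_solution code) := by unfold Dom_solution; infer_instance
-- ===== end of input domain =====

-- B re-decomposes A's single stateful character walk as: split on the toggle character, segment index parity = mode,
-- filter each segment's characters by absolute-index parity; same output, different decomposition (not faster).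

-- ===== PORT A =====
-- A's loop over i in range(len(code)) with state (mode, ret); i and mode are the loop counters (always ≥ 0).
def solutionLoop : List Char → Nat → Nat → List Char → List Char
  | [], _, _, ret => ret
  | c :: cs, i, mode, ret =>
    if mode == 0 then
      if c == '1' then solutionLoop cs (i + 1) 1 ret
      else if i % 2 == 0 then solutionLoop cs (i + 1) 0 (ret ++ [c])
      else solutionLoop cs (i + 1) 0 ret
    else
      if c == '1' then solutionLoop cs (i + 1) 0 ret
      else if i % 2 == 1 then solutionLoop cs (i + 1) 1 (ret ++ [c])
      else solutionLoop cs (i + 1) 1 ret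

def solution (code : String) : String :=
  let ret := solutionLoop code.toList 0 0 []
  if ret.length == 0 then "EMPTY" else String.ofList ret

-- ===== PORT B =====
-- inner loop of Source B: for off, ch in enumerate(seg): append when (pos+off) % 2 == mode
def segLoop : List Char → Nat → Nat → Nat → List Char → List Char
  | [], _, _, _, ret => ret
  | c :: cs, pos, off, mode, ret =>
    segLoop cs pos (off + 1) mode (if (pos + off) % 2 == mode then ret ++ [c] else ret)

-- outer loop of Source B: for j, seg in enumerate(code.split('1')), advancing pos by len(seg)+1
def segsLoop : List (List Char) → Nat → Nat → List Char → List Char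
  | [], _, _, ret => ret
  | seg :: rest, j, pos, ret =>
    segsLoop rest (j + 1) (pos + seg.length + 1) (segLoop seg pos 0 (j % 2) ret)

def solution_alt (code : String) : String :=
  let ret := segsLoop (code.toList.splitOn '1') 0 0 []
  if ret == [] then "EMPTY" else String.ofList ret

-- ===== PRECONDITION & SPEC =====
def Spec_solution (code : String) (out : String) : Prop := out = solution_alt code
instance (code : String) (out : String) : Decidable (Spec_solution code out) := by unfold Spec_solution; infer_instance

-- ===== CLAIM (what is proved, stated in full; the proofs are below) =====
def Claim_equal_solution : Prop := ∀ (code : String), Dom_solution code → Spec_solution code (solution code)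

-- ===== LEMMAS AND PROOFS =====

theorem solutionLoop_acc (l : List Char) (i mode : Nat) (ret : List Char) :
    solutionLoop l i mode ret = ret ++ solutionLoop l i mode [] := by
  induction l generalizing i mode ret with
  | nil => simp [solutionLoop]
  | cons c cs ih =>
    simp only [solutionLoop]
    split_ifs <;>
      first
        | (rw [ih (i+1) _ (ret ++ [c]), ih (i+1) _ ([] ++ [c])]; simp)
        | rw [ih (i+1) _ ret]

theorem segLoop_acc (l : List Char) (pos off mode : Nat) (ret : List Char) :
    segLoop l pos off mode ret = ret ++ segLoop l pos off mode [] := by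
  induction l generalizing off ret with
  | nil => simp [segLoop]
  | cons c cs ih =>
    simp only [segLoop]
    split_ifs <;>
      first
        | (rw [ih (off+1) (ret ++ [c]), ih (off+1) ([] ++ [c])]; simp)
        | rw [ih (off+1) ret]

theorem segsLoop_acc (l : List (List Char)) (j pos : Nat) (ret : List Char) :
    segsLoop l j pos ret = ret ++ segsLoop l j pos [] := by
  induction l generalizing j pos ret with
  | nil => simp [segsLoop]
  | cons seg rest ih =>
    simp only [segsLoop]
    rw [segLoop_acc seg pos 0 (j % 2) ret, ih (j+1) _ (ret ++ _), ih (j+1) _ (segLoop _ _ _ _ [])]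
    simp

theorem splitOnP_ne_nil {α : Type} (p : α → Bool) (l : List α) : l.splitOnP p ≠ [] := by
  induction l with
  | nil => simp [List.splitOnP_nil]
  | cons a l ih =>
    rw [List.splitOnP_cons]
    split_ifs
    · simp
    · cases h : l.splitOnP p with
      | nil => exact absurd h ih
      | cons s t => simp [List.modifyHead]

-- segLoop starting a segment at absolute position pos with off replaced by an arbitrary start:
-- only pos + off matters, and we only ever call it with off = 0, so state it that way.
theorem segLoop_shift (l : List Char) (pos off mode : Nat) :
    segLoop l pos off mode [] = segLoop l (pos + off) 0 mode [] := by
  induction l generalizing pos off with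
  | nil => simp [segLoop]
  | cons c cs ih =>
    simp only [segLoop]
    rw [segLoop_acc cs pos (off+1) mode, segLoop_acc cs (pos+off) 1 mode,
        ih pos (off+1), ih (pos+off) 1]
    have h1 : pos + (off + 1) = pos + off + 1 := by omega
    rw [h1]
    simp

-- the heart: A's walk over the characters equals B's walk over the '1'-split segments
theorem loop_eq_segs (l : List Char) (pos j : Nat) :
    solutionLoop l pos (j % 2) [] = segsLoop (l.splitOn '1') j pos [] := by
  induction l generalizing pos j with
  | nil =>
    simp [solutionLoop, List.splitOn, List.splitOnP_nil, segsLoop, segLoop]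
  | cons c cs ih =>
    by_cases hc : c = '1'
    · subst hc
      have hsplit : ('1' :: cs).splitOn '1' = [] :: cs.splitOn '1' := by
        simp [List.splitOn, List.splitOnP_cons]
      rw [hsplit]
      have hA : solutionLoop ('1' :: cs) pos (j % 2) [] = solutionLoop cs (pos + 1) ((j+1) % 2) [] := by
        simp only [solutionLoop]
        rcases Nat.mod_two_eq_zero_or_one j with h | h <;>
          simp [h, Nat.add_mod]
      rw [hA, ih (pos+1) (j+1)]
      simp [segsLoop, segLoop]
    · obtain ⟨h, t, hht⟩ : ∃ h t, cs.splitOn '1' = h :: t := by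
        cases hx : cs.splitOn '1' with
        | nil => exact absurd hx (splitOnP_ne_nil _ cs)
        | cons h t => exact ⟨h, t, rfl⟩
      have hsplit : (c :: cs).splitOn '1' = (c :: h) :: t := by
        simp [List.splitOn, List.splitOnP_cons, hc]
        rw [show cs.splitOnP (· == '1') = h :: t from hht]
        rfl
      rw [hsplit]
      -- B side: peel c off the first segment
      have hB : segsLoop ((c :: h) :: t) j pos [] =
          (if pos % 2 == j % 2 then [c] else []) ++ segsLoop (h :: t) j (pos + 1) [] := by
        simp only [segsLoop, segLoop, List.length_cons]
        rw [segLoop_acc h pos 1 (j % 2), segLoop_shift h pos 1 (j % 2)]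
        rw [segsLoop_acc t (j+1) (pos + (h.length + 1) + 1),
            segsLoop_acc t (j+1) (pos + 1 + h.length + 1)]
        have h1 : pos + (h.length + 1) + 1 = pos + 1 + h.length + 1 := by omega
        rw [h1]
        simp
      rw [hB, ← hht, ← ih (pos+1) j]
      -- A side: one step
      have hA : solutionLoop (c :: cs) pos (j % 2) [] =
          (if pos % 2 == j % 2 then [c] else []) ++ solutionLoop cs (pos + 1) (j % 2) [] := by
        simp only [solutionLoop]
        rcases Nat.mod_two_eq_zero_or_one j with h2 | h2 <;>
          rcases Nat.mod_two_eq_zero_or_one pos with h3 | h3 <;>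
            simp [h2, h3, hc, solutionLoop_acc cs (pos+1) _ [c]]
      rw [hA]

-- ===== VERDICT (by name: the statement is the Claim_ definition above) =====
theorem solution_spec : Claim_equal_solution := by
  intro code _
  unfold Spec_solution solution solution_alt
  have := loop_eq_segs code.toList 0 0
  simp only [Nat.zero_mod] at this
  rw [this]
  cases h : segsLoop (code.toList.splitOn '1') 0 0 [] <;> simp
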